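-- pv_equiv track=rewrite | github.com/antheymans/Topologie-Roman | Source_code_output/src/bookDialogExtraction.py | spacing_map
-- ===== SOURCE A (Python) =====
-- def spacing_map(sentences,breaks):
--     dialog_spacing = []
--     previousIndex = 0
--     sceneBreak = True
--     for index in range(len(sentences)):
--         if breaks[index]:
--             sceneBreak = True
--         elif '"' in sentences[index]:
--             if (sceneBreak): #First dialog after a scene break
--                 dialog_spacing.append((index,0))
--             else:
--                 dialog_spacing.append((index,index-previousIndex))
--             sceneBreak = False
--             previousIndex = index
--     return dialog_spacing
-- ===== SOURCE B (Python) =====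
-- def spacing_map(sentences, breaks):
--     # Partition indices into scene segments (a break starts a new segment and
--     # masks any quote in that sentence), keeping only dialog indices.
--     segments = [[]]
--     for i, s in enumerate(sentences):
--         if breaks[i]:
--             segments.append([])
--         elif '"' in s:
--             segments[-1].append(i)
--     # Emit per segment: first dialog gets spacing 0, each next its distance
--     # to the previous dialog of the same segment.
--     out = []
--     for seg in segments:
--         if seg:
--             out.append((seg[0], 0))
--             out.extend((j, j - p) for p, j in zip(seg, seg[1:]))
--     return out
-- ===== Notes on version B (the rewrite author's own statement) =====
-- stated objective: alternative
-- what changed: A's single stateful loop (previousIndex/sceneBreak flags) is replaced by a two-phase decomposition: first partition the dialog indices into scene segments (a break starts a new segment and masks a quote), then emit per segment (first, 0) followed by (j, j - p) for adjacent dialog pairs via zip.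
import Mathlib
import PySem

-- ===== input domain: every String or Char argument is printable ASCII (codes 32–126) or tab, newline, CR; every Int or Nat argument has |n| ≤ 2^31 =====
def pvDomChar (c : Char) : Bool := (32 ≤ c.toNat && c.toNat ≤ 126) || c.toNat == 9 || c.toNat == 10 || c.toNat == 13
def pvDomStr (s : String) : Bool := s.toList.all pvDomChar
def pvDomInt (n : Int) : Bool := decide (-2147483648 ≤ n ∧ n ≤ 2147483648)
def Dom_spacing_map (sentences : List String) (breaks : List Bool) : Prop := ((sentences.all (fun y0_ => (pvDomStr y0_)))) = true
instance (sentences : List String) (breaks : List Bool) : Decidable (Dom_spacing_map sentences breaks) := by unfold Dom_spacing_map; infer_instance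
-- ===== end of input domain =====

-- B re-decomposes A's single stateful loop into: partition indices into scene
-- segments, then emit the spacing pairs per segment (objective: alternative).

-- ===== PORT A =====
-- literal port of A: one loop over range(len(sentences)) carrying
-- (dialog_spacing, previousIndex, sceneBreak)
def spacing_map (sentences : List String) (breaks : List Bool) : List (Int × Int) :=
  ((PySem.List.pyRange 0 (PySem.List.len sentences) 1).foldl
    (fun (st : List (Int × Int) × Int × Bool) index =>
      if PySem.List.pyGetD breaks index false then
        (st.1, st.2.1, true)
      else if PySem.Str.isIn "\"" (PySem.List.pyGetD sentences index "") then
        ((if st.2.2 then st.1 ++ [(index, 0)] else st.1 ++ [(index, index - st.2.1)]), index, false)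
      else st)
    ([], 0, true)).1

-- ===== PORT B =====
-- emit for one segment: (first, 0) then (j, j - p) for adjacent dialog pairs (zip(seg, seg[1:]))
def pvEmitSeg (seg : List Int) : List (Int × Int) :=
  match seg with
  | [] => []
  | x :: xs => (x, 0) :: ((x :: xs).zip xs).map (fun pj => (pj.2, pj.2 - pj.1))

def spacing_map_alt (sentences : List String) (breaks : List Bool) : List (Int × Int) :=
  let st := (PySem.List.enumerate sentences 0).foldl
    (fun (st : List (List Int) × List Int) is =>
      if PySem.List.pyGetD breaks is.1 false then (st.1 ++ [st.2], ([] : List Int))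
      else if PySem.Str.isIn "\"" is.2 then (st.1, st.2 ++ [is.1])
      else st)
    ([], [])
  (st.1 ++ [st.2]).foldl (fun out seg => out ++ pvEmitSeg seg) []

-- ===== PRECONDITION & SPEC =====
-- Pre_ excludes exactly the inputs where A raises IndexError: breaks shorter than sentences.
def Pre_spacing_map (sentences : List String) (breaks : List Bool) : Prop :=
  sentences.length ≤ breaks.length
instance (sentences : List String) (breaks : List Bool) : Decidable (Pre_spacing_map sentences breaks) := by
  unfold Pre_spacing_map; infer_instance

def pvWitness_spacing_map : List String × List Bool :=
  (["\"Hi.\"", "He left.", "\"Bye.\""], [false, false, false])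

def Spec_spacing_map (sentences : List String) (breaks : List Bool) (out : List (Int × Int)) : Prop := out = spacing_map_alt sentences breaks
instance (sentences : List String) (breaks : List Bool) (out : List (Int × Int)) : Decidable (Spec_spacing_map sentences breaks out) := by unfold Spec_spacing_map; infer_instance

-- ===== CLAIM (what is proved, stated in full; the proofs are below) =====
def Claim_equal_spacing_map : Prop := ∀ (sentences : List String) (breaks : List Bool), Dom_spacing_map sentences breaks → Pre_spacing_map sentences breaks → Spec_spacing_map sentences breaks (spacing_map sentences breaks)

-- ===== LEMMAS AND PROOFS =====

-- pairs of a segment, written recursively (proof-side view of B's zip)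
def pvPairsFrom (p : Int) : List Int → List (Int × Int)
  | [] => []
  | j :: js => (j, j - p) :: pvPairsFrom j js

theorem pvZip_eq_pairsFrom (xs : List Int) : ∀ (p : Int),
    ((p :: xs).zip xs).map (fun pj => (pj.2, pj.2 - pj.1)) = pvPairsFrom p xs := by
  induction xs with
  | nil => intro p; rfl
  | cons j js ih => intro p; simp [pvPairsFrom, ← ih j]

theorem pvEmitSeg_cons (x : Int) (xs : List Int) :
    pvEmitSeg (x :: xs) = (x, 0) :: pvPairsFrom x xs := by
  simp [pvEmitSeg, pvZip_eq_pairsFrom]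

theorem pvPairsFrom_snoc2 (rest : List Int) : ∀ (q p j : Int),
    pvPairsFrom q (rest ++ [p, j]) = pvPairsFrom q (rest ++ [p]) ++ [(j, j - p)] := by
  induction rest with
  | nil => intro q p j; simp [pvPairsFrom]
  | cons a t ih => intro q p j; simp [pvPairsFrom, ih a]

theorem pvEmitSeg_snoc2 (cur0 : List Int) (p j : Int) :
    pvEmitSeg (cur0 ++ [p, j]) = pvEmitSeg (cur0 ++ [p]) ++ [(j, j - p)] := by
  cases cur0 with
  | nil => simp [pvEmitSeg_cons, pvPairsFrom]
  | cons a t =>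
    simp only [List.cons_append, pvEmitSeg_cons, pvPairsFrom_snoc2]

-- loop correspondence: A's stateful loop vs B's segment-building loop, over any
-- index list and any pair of Bool tests fb (break) / fq (dialog)
theorem pv_loop_eq (fb fq : Int → Bool) (L : List Int) :
    ∀ (ds : List (Int × Int)) (done : List (List Int)) (cur : List Int) (prev : Int) (sb : Bool),
    (if sb then cur = [] else ∃ cur0, cur = cur0 ++ [prev]) →
    ds = done.flatMap pvEmitSeg ++ pvEmitSeg cur →
    (L.foldl
      (fun (st : List (Int × Int) × Int × Bool) index =>
        if fb index then (st.1, st.2.1, true)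
        else if fq index then
          ((if st.2.2 then st.1 ++ [(index, 0)] else st.1 ++ [(index, index - st.2.1)]), index, false)
        else st)
      (ds, prev, sb)).1
    = ((L.foldl
        (fun (st : List (List Int) × List Int) j =>
          if fb j then (st.1 ++ [st.2], ([] : List Int))
          else if fq j then (st.1, st.2 ++ [j])
          else st)
        (done, cur)).1
       ++ [(L.foldl
        (fun (st : List (List Int) × List Int) j =>
          if fb j then (st.1 ++ [st.2], ([] : List Int))
          else if fq j then (st.1, st.2 ++ [j])
          else st)
        (done, cur)).2]).flatMap pvEmitSeg := by
  induction L with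
  | nil =>
    intro ds done cur prev sb hinv hds
    simp [hds, pvEmitSeg]
  | cons j L ih =>
    intro ds done cur prev sb hinv hds
    simp only [List.foldl_cons]
    by_cases hb : fb j
    · simp only [hb, if_true]
      exact ih ds (done ++ [cur]) [] prev true rfl (by simp [hds, pvEmitSeg])
    · by_cases hq : fq j
      · simp only [hb, hq, Bool.false_eq_true, if_neg, not_false_iff, if_true]
        cases sb with
        | true =>
          have hcur : cur = [] := by simpa using hinv
          subst hcur
          refine ih (ds ++ [(j, 0)]) done [j] j false ⟨[], rfl⟩ ?_
          simp [hds, pvEmitSeg]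
        | false =>
          obtain ⟨cur0, hcur⟩ : ∃ cur0, cur = cur0 ++ [prev] := by simpa using hinv
          subst hcur
          simp only [List.append_assoc, List.cons_append, List.nil_append,
            Bool.false_eq_true, if_false]
          refine ih (ds ++ [(j, j - prev)]) done (cur0 ++ [prev, j]) j false
            ⟨cur0 ++ [prev], by simp⟩ ?_
          simp [hds, pvEmitSeg_snoc2]
      · simp only [hb, hq, Bool.false_eq_true, if_neg, not_false_iff]
        exact ih ds done cur prev sb hinv hds

-- ===== VERDICT (by name: the statement is the Claim_ definition above) =====
theorem spacing_map_spec : Claim_equal_spacing_map := by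
  intro sentences breaks _ _
  unfold Spec_spacing_map spacing_map spacing_map_alt
  rw [PySem.List.enumerate_eq_map_pyRange (d := ""), List.foldl_map,
      PySem.List.foldl_append_eq_flatMap]
  simp only [List.nil_append]
  exact pv_loop_eq (fun j => PySem.List.pyGetD breaks j false)
    (fun j => PySem.Str.isIn "\"" (PySem.List.pyGetD sentences j ""))
    (PySem.List.pyRange 0 (PySem.List.len sentences) 1) [] [] [] 0 true rfl rfl
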